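-- pv_equiv track=rewrite | github.com/10100011/fpl-data-munger | fpl-data-munger/fpl-data-munger/fantasy.py | apply_cumulative_sum
-- ===== SOURCE A (Python) =====
-- def apply_cumulative_sum(event_results, player_names):
--     """Modify event results to ensure each row accumulates previous event scores."""
--     sorted_events = sorted(event_results.keys())
--     sorted_players = sorted(player_names.keys())
--     cumulative_scores = {name: 0 for name in sorted_players}
--
--     for event in sorted_events:
--         for player in sorted_players:
--             cumulative_scores[player] += event_results[event].get(player, 0)
--             event_results[event][player] = cumulative_scores[player]
--
--     return event_results
-- ===== SOURCE B (Python) =====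
-- def apply_cumulative_sum(event_results, player_names):
--     """Modify event results to ensure each row accumulates previous event scores.
--
--     Direct prefix-sum formulation: snapshot the original score matrix, then write
--     each cell as an explicit sum over the event prefix (no running accumulators).
--     Mutates and returns event_results, like the original.
--     """
--     sorted_events = sorted(event_results.keys())
--     sorted_players = sorted(player_names.keys())
--     scores = [[event_results[e].get(p, 0) for p in sorted_players] for e in sorted_events]
--     for i, e in enumerate(sorted_events):
--         for j, p in enumerate(sorted_players):
--             event_results[e][p] = sum(scores[k][j] for k in range(i + 1))
--     return event_results
-- ===== Notes on version B (the rewrite author's own statement) =====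
-- stated objective: alternative
-- what changed: B eliminates all running accumulators: it snapshots the original score matrix once, then writes each cell directly as an explicit prefix sum over the snapshot (sum(scores[k][j] for k in range(i+1))), whereas A threads a dict of running totals through an event-major sweep.
import Mathlib
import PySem

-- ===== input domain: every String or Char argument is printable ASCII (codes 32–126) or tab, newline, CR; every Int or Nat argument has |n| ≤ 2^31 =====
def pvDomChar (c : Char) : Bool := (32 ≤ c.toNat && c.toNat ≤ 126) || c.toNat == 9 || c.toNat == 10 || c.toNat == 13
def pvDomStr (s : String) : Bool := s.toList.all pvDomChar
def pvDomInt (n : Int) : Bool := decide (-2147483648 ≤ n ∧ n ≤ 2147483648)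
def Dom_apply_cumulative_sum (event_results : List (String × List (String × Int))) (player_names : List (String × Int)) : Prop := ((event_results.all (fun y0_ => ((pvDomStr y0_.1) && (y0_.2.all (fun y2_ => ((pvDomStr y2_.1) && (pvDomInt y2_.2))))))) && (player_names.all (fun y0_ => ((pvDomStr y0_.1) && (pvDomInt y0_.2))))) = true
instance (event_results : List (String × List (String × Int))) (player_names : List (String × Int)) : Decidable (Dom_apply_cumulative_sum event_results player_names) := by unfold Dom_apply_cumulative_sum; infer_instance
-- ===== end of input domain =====

-- ===== PORT A =====
-- B replaces A's running-total accumulators by a snapshot of the original score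
-- matrix plus direct prefix-sum computation per cell; same return value. Both
-- Pythons mutate and return the event_results dict; the equivalence proved here
-- is about the returned value.

-- step of A's inner loop: one (event, player) update of (cumulative_scores, event_results)
def pvStepA (e : String) (st : PySem.Dict String Int × PySem.Dict String (PySem.Dict String Int))
    (p : String) : PySem.Dict String Int × PySem.Dict String (PySem.Dict String Int) :=
  let v := st.1.getD p 0 + (st.2.getD e PySem.Dict.empty).getD p 0
  (st.1.insert p v, st.2.modify e PySem.Dict.empty (fun ed => ed.insert p v))

def apply_cumulative_sum (event_results : List (String × List (String × Int))) (player_names : List (String × Int)) : List (String × List (String × Int)) :=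
  let ER := PySem.Dict.ofList (event_results.map (fun q => (q.1, PySem.Dict.ofList q.2)))
  let sorted_events := PySem.List.sorted ER.keys (fun x => x) false
  let sorted_players := PySem.List.sorted (PySem.Dict.ofList player_names).keys (fun x => x) false
  let cumulative0 : PySem.Dict String Int :=
    sorted_players.foldl (fun d n => d.insert n 0) PySem.Dict.empty
  let fin := sorted_events.foldl (fun st e => sorted_players.foldl (pvStepA e) st) (cumulative0, ER)
  fin.2.items.map (fun q => (q.1, q.2.items))

-- ===== PORT B =====
-- B's generator sum 'sum(scores[k][j] for k in range(i + 1))'; the list indexings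
-- scores[k] and scores[k][j] are ported with the total pyGetD (exact here: both
-- indices are always in range)
def pvBval (scores : List (List Int)) (i j : Int) : Int :=
  (PySem.List.pyRange 0 (i + 1) 1).foldl
    (fun s k => s + PySem.List.pyGetD (PySem.List.pyGetD scores k []) j 0) 0

def apply_cumulative_sum_alt (event_results : List (String × List (String × Int))) (player_names : List (String × Int)) : List (String × List (String × Int)) :=
  let ER := PySem.Dict.ofList (event_results.map (fun q => (q.1, PySem.Dict.ofList q.2)))
  let sorted_events := PySem.List.sorted ER.keys (fun x => x) false
  let sorted_players := PySem.List.sorted (PySem.Dict.ofList player_names).keys (fun x => x) false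
  let scores := sorted_events.map (fun e => sorted_players.map (fun p => (ER.getD e PySem.Dict.empty).getD p 0))
  let fin := (PySem.List.enumerate sorted_events 0).foldl
    (fun R ie => (PySem.List.enumerate sorted_players 0).foldl
      (fun R jp => R.modify ie.2 PySem.Dict.empty
        (fun ed => ed.insert jp.2 (pvBval scores ie.1 jp.1))) R) ER
  fin.items.map (fun q => (q.1, q.2.items))

-- ===== PRECONDITION & SPEC =====
def Spec_apply_cumulative_sum (event_results : List (String × List (String × Int))) (player_names : List (String × Int)) (out : List (String × List (String × Int))) : Prop := out = apply_cumulative_sum_alt event_results player_names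
instance (event_results : List (String × List (String × Int))) (player_names : List (String × Int)) (out : List (String × List (String × Int))) : Decidable (Spec_apply_cumulative_sum event_results player_names out) := by unfold Spec_apply_cumulative_sum; infer_instance

-- ===== CLAIM (what is proved, stated in full; the proofs are below) =====
def Claim_equal_apply_cumulative_sum : Prop := ∀ (event_results : List (String × List (String × Int))) (player_names : List (String × Int)), Dom_apply_cumulative_sum event_results player_names → Spec_apply_cumulative_sum event_results player_names (apply_cumulative_sum event_results player_names)

-- ===== LEMMAS AND PROOFS =====

-- original score of player p at event e
def pvSc (ER : PySem.Dict String (PySem.Dict String Int)) (e p : String) : Int :=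
  (ER.getD e PySem.Dict.empty).getD p 0

-- sum of p's original scores over a list of events
def pvSum (ER : PySem.Dict String (PySem.Dict String Int)) (L : List String) (p : String) : Int :=
  (L.map (fun e => pvSc ER e p)).sum

-- A's inner player pass at one event, compared with B's inner pass writing the
-- precomputed values F; g is the (fixed) score read, c the incoming totals
theorem pv_inner (e : String) (F : Int → Int) (g c : String → Int) (P : List String) :
    ∀ (s : Int) (cs : PySem.Dict String Int) (R : PySem.Dict String (PySem.Dict String Int)),
    P.Nodup →
    (∀ p ∈ P, (R.getD e PySem.Dict.empty).getD p 0 = g p) →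
    (∀ p ∈ P, cs.getD p 0 = c p) →
    (∀ jp ∈ PySem.List.enumerate P s, F jp.1 = c jp.2 + g jp.2) →
    (P.foldl (pvStepA e) (cs, R)).2
        = (PySem.List.enumerate P s).foldl
            (fun R jp => R.modify e PySem.Dict.empty (fun ed => ed.insert jp.2 (F jp.1))) R
    ∧ (∀ q, (P.foldl (pvStepA e) (cs, R)).1.getD q 0
        = cs.getD q 0 + (if q ∈ P then g q else 0))
    ∧ (∀ e', e' ≠ e → (P.foldl (pvStepA e) (cs, R)).2.getD e' PySem.Dict.empty
        = R.getD e' PySem.Dict.empty) := by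
  induction P with
  | nil =>
    intro s cs R _ _ _ _
    refine ⟨rfl, fun q => by simp, fun e' _ => rfl⟩
  | cons p P ih =>
    intro s cs R hnd hg hcs hF
    have hpP : p ∉ P := (List.nodup_cons.mp hnd).1
    have hv : cs.getD p 0 + (R.getD e PySem.Dict.empty).getD p 0 = c p + g p := by
      rw [hcs p (List.mem_cons_self ..), hg p (List.mem_cons_self ..)]
    have hstep : pvStepA e (cs, R) p
        = (cs.insert p (c p + g p),
           R.modify e PySem.Dict.empty (fun ed => ed.insert p (c p + g p))) := by
      simp only [pvStepA, hv]
    set cs' := cs.insert p (c p + g p) with hcs'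
    set R' := R.modify e PySem.Dict.empty (fun ed => ed.insert p (c p + g p)) with hR'
    have hg' : ∀ q ∈ P, (R'.getD e PySem.Dict.empty).getD q 0 = g q := by
      intro q hq
      have hqp : q ≠ p := fun h => hpP (h ▸ hq)
      rw [hR', PySem.Dict.getD_modify_self, PySem.Dict.getD_insert_of_ne _ _ _ hqp]
      exact hg q (List.mem_cons_of_mem p hq)
    have hcs2 : ∀ q ∈ P, cs'.getD q 0 = c q := by
      intro q hq
      have hqp : q ≠ p := fun h => hpP (h ▸ hq)
      rw [hcs', PySem.Dict.getD_insert_of_ne _ _ _ hqp]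
      exact hcs q (List.mem_cons_of_mem p hq)
    have hF' : ∀ jp ∈ PySem.List.enumerate P (s + 1), F jp.1 = c jp.2 + g jp.2 := by
      intro jp hjp
      exact hF jp (by rw [PySem.List.enumerate_cons]; exact List.mem_cons_of_mem _ hjp)
    obtain ⟨ih1, ih2, ih3⟩ := ih (s + 1) cs' R' (List.nodup_cons.mp hnd).2 hg' hcs2 hF'
    refine ⟨?_, ?_, ?_⟩
    · rw [List.foldl_cons, hstep, ih1, PySem.List.enumerate_cons, List.foldl_cons]
      have : F s = c p + g p := hF (s, p) (by rw [PySem.List.enumerate_cons]; exact List.mem_cons_self ..)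
      rw [this]
    · intro q
      rw [List.foldl_cons, hstep, ih2 q]
      by_cases hqp : q = p
      · subst hqp
        rw [hcs', PySem.Dict.getD_insert_self]
        have : q ∉ P := hpP
        simp [this, hcs q (List.mem_cons_self ..)]
      · rw [hcs', PySem.Dict.getD_insert_of_ne _ _ _ hqp]
        simp [List.mem_cons, hqp]
    · intro e' he'
      rw [List.foldl_cons, hstep, ih3 e' he', hR',
          PySem.Dict.getD_modify_of_ne _ _ _ he']

-- the port-B prefix sum equals the sum of original scores over the event prefix
theorem pv_Bsum (ER : PySem.Dict String (PySem.Dict String Int)) (SE SP : List String)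
    (j : Nat) (hj : j < SP.length) :
    ∀ n : Nat, n ≤ SE.length →
    (PySem.List.pyRange 0 (n : Int) 1).foldl
      (fun s k => s + PySem.List.pyGetD
        (PySem.List.pyGetD (SE.map (fun e => SP.map (fun p => pvSc ER e p))) k []) (j : Int) 0) 0
      = pvSum ER (SE.take n) (SP.get ⟨j, hj⟩) := by
  intro n
  induction n with
  | zero =>
    intro _
    rw [show ((0 : Nat) : Int) = 0 from rfl, PySem.List.pyRange_one_eq_nil (le_refl 0)]
    simp [pvSum]
  | succ n ihn =>
    intro hn
    have hn' : n ≤ SE.length := Nat.le_of_succ_le hn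
    have hnlt : n < SE.length := hn
    have hcast : ((n + 1 : Nat) : Int) = (n : Int) + 1 := by push_cast; ring
    rw [hcast, PySem.List.pyRange_one_succ_right (by positivity), List.foldl_append,
        ihn hn', List.foldl_cons, List.foldl_nil]
    have h1 : PySem.List.pyGetD (SE.map (fun e => SP.map (fun p => pvSc ER e p))) (n : Int) []
        = SP.map (fun p => pvSc ER (SE.get ⟨n, hnlt⟩) p) := by
      rw [PySem.List.pyGetD_natCast, List.getD_eq_getElem?_getD,
          List.getElem?_map, List.getElem?_eq_getElem hnlt]
      rfl
    have h2 : PySem.List.pyGetD (SP.map (fun p => pvSc ER (SE.get ⟨n, hnlt⟩) p)) (j : Int) 0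
        = pvSc ER (SE.get ⟨n, hnlt⟩) (SP.get ⟨j, hj⟩) := by
      rw [PySem.List.pyGetD_natCast, List.getD_eq_getElem?_getD,
          List.getElem?_map, List.getElem?_eq_getElem hj]
      rfl
    rw [h1, h2]
    have h3 : SE.take (n + 1) = SE.take n ++ [SE.get ⟨n, hnlt⟩] := by
      rw [List.take_add_one, List.getElem?_eq_getElem hnlt]
      rfl
    rw [h3]
    unfold pvSum
    rw [List.map_append, List.sum_append]
    simp

-- loop correspondence: A's remaining event-major sweep equals B's remaining
-- enumerated writes, given the invariant on totals and untouched future events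
theorem pv_outer (ER : PySem.Dict String (PySem.Dict String Int)) (SP SE : List String)
    (hSP : SP.Nodup) :
    ∀ (rest done : List String), SE = done ++ rest → rest.Nodup →
    ∀ (cs : PySem.Dict String Int) (R : PySem.Dict String (PySem.Dict String Int)),
    (∀ p ∈ SP, cs.getD p 0 = pvSum ER done p) →
    (∀ e ∈ rest, R.getD e PySem.Dict.empty = ER.getD e PySem.Dict.empty) →
    (rest.foldl (fun st e => SP.foldl (pvStepA e) st) (cs, R)).2
      = (PySem.List.enumerate rest (done.length : Int)).foldl
          (fun R ie => (PySem.List.enumerate SP 0).foldl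
            (fun R jp => R.modify ie.2 PySem.Dict.empty
              (fun ed => ed.insert jp.2
                (pvBval (SE.map (fun e => SP.map (fun p => pvSc ER e p))) ie.1 jp.1))) R) R := by
  intro rest
  induction rest with
  | nil => intro done _ _ cs R _ _; rfl
  | cons e rest ih =>
    intro done hSE hnd cs R hcs hR
    have heSE : SE.take (done.length + 1) = done ++ [e] := by
      rw [hSE, show done.length + 1 = done.length + 1 from rfl]
      rw [List.take_length_add_append 1]
      rfl
    have hF : ∀ jp ∈ PySem.List.enumerate SP 0,
        pvBval (SE.map (fun e => SP.map (fun p => pvSc ER e p))) (done.length : Int) jp.1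
          = pvSum ER done jp.2 + pvSc ER e jp.2 := by
      intro jp hjp
      obtain ⟨k, hk, hjpeq⟩ := (PySem.List.mem_enumerate_iff SP 0 jp).mp hjp
      subst hjpeq
      have hz : (0 : Int) + (k : Int) = (k : Int) := by ring
      have hcast : ((done.length : Int) + 1) = ((done.length + 1 : Nat) : Int) := by push_cast; ring
      have hlen : done.length + 1 ≤ SE.length := by
        rw [hSE]; simp
      have := pv_Bsum ER SE SP k hk (done.length + 1) hlen
      simp only [pvBval, hz, hcast]
      rw [this, heSE]
      simp [pvSum]
    have hg : ∀ p ∈ SP, (R.getD e PySem.Dict.empty).getD p 0 = pvSc ER e p := by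
      intro p _
      rw [hR e (List.mem_cons_self ..)]; rfl
    obtain ⟨h1, h2, h3⟩ := pv_inner e
      (fun i => pvBval (SE.map (fun e => SP.map (fun p => pvSc ER e p))) (done.length : Int) i)
      (fun p => pvSc ER e p) (fun p => pvSum ER done p) SP 0 cs R hSP hg hcs
      (by intro jp hjp; exact hF jp hjp)
    set st' := SP.foldl (pvStepA e) (cs, R) with hst'
    have hcs' : ∀ p ∈ SP, st'.1.getD p 0 = pvSum ER (done ++ [e]) p := by
      intro p hp
      rw [hst', h2 p, if_pos hp, hcs p hp]
      simp [pvSum]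
    have hR' : ∀ e' ∈ rest, st'.2.getD e' PySem.Dict.empty = ER.getD e' PySem.Dict.empty := by
      intro e' he'
      have hne : e' ≠ e := fun h => (List.nodup_cons.mp hnd).1 (h ▸ he')
      rw [hst', h3 e' hne, hR e' (List.mem_cons_of_mem e he')]
    have hSE' : SE = (done ++ [e]) ++ rest := by rw [hSE]; simp
    have := ih (done ++ [e]) hSE' (List.nodup_cons.mp hnd).2 st'.1 st'.2 hcs' hR'
    rw [List.foldl_cons, PySem.List.enumerate_cons, List.foldl_cons]
    have hst'eta : (st'.1, st'.2) = st' := rfl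
    rw [show SP.foldl (pvStepA e) (cs, R) = st' from rfl, ← hst'eta, this, h1]
    have hlen' : ((done ++ [e]).length : Int) = (done.length : Int) + 1 := by
      simp
    rw [hlen']

theorem pv_cs0_getD : ∀ (l : List String) (d : PySem.Dict String Int) (p : String),
    d.getD p 0 = 0 → (l.foldl (fun d n => d.insert n 0) d).getD p 0 = 0 := by
  intro l
  induction l with
  | nil => intro d p h; exact h
  | cons n l ih =>
    intro d p h
    refine ih _ p ?_
    by_cases hpn : p = n
    · subst hpn; rw [PySem.Dict.getD_insert_self]
    · rw [PySem.Dict.getD_insert_of_ne _ _ _ hpn]; exact h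

-- ===== VERDICT (by name: the statement is the Claim_ definition above) =====
theorem apply_cumulative_sum_spec : Claim_equal_apply_cumulative_sum := by
  intro event_results player_names _
  unfold Spec_apply_cumulative_sum apply_cumulative_sum apply_cumulative_sum_alt
  refine congrArg (fun d : PySem.Dict String (PySem.Dict String Int) => d.items.map (fun q => (q.1, q.2.items))) ?_
  set ER := PySem.Dict.ofList (event_results.map (fun q => (q.1, PySem.Dict.ofList q.2))) with hER
  set SE := PySem.List.sorted ER.keys (fun x => x) false with hSE
  set SP := PySem.List.sorted (PySem.Dict.ofList player_names).keys (fun x => x) false with hSP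
  set cs0 : PySem.Dict String Int := SP.foldl (fun d n => d.insert n 0) PySem.Dict.empty with hcs0
  have hSnd : SE.Nodup := (PySem.List.sorted_perm ER.keys (fun x => x) false).symm.nodup
    (PySem.Dict.nodup_keys_ofList _)
  have hPnd : SP.Nodup := (PySem.List.sorted_perm (PySem.Dict.ofList player_names).keys (fun x => x) false).symm.nodup
    (PySem.Dict.nodup_keys_ofList _)
  have hcs : ∀ p ∈ SP, cs0.getD p 0 = pvSum ER [] p := by
    intro p _
    rw [pv_cs0_getD _ _ p (PySem.Dict.getD_empty p 0)]
    rfl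
  have := pv_outer ER SP SE hPnd SE [] rfl hSnd cs0 ER hcs (fun _ _ => rfl)
  simpa using this
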